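-- pv_equiv track=rewrite | github.com/zorro123q/zbwj | app/worker/components/extractor.py | _collect_keyword_hits
-- ===== SOURCE A (Python) =====
-- from typing import Any, Dict, List, Tuple
--
-- def _collect_keyword_hits(lines: List[str], keywords: List[str], limit: int = 100) -> List[Tuple[int, str]]:
--     """
--     Collects lines containing any keyword.
--     Returns list of (line_idx_1_based, line_text)
--     """
--     hits = []
--     for i, ln in enumerate(lines, start=1):
--         if any(k in ln for k in keywords):
--             hits.append((i, ln))
--             if len(hits) >= limit:
--                 break
--     return hits
-- ===== SOURCE B (Python) =====
-- from typing import List, Tuple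
--
-- def _collect_keyword_hits(lines: List[str], keywords: List[str], limit: int = 100) -> List[Tuple[int, str]]:
--     if limit <= 0:
--         return []
--     matched = set()
--     for k in keywords:
--         matched.update(i for i, ln in enumerate(lines, start=1) if k in ln)
--     return [(i, lines[i - 1]) for i in sorted(matched)[:limit]]
-- ===== Notes on version B (the rewrite author's own statement) =====
-- stated objective: alternative
-- what changed: B inverts the loop nesting: instead of A's line-major loop with an accumulator and break, it collects per keyword the set of matching 1-based line indices (one C-level scan of the lines per keyword), then sorts the set, takes the first `limit` indices and rebuilds the (index, line) pairs by indexing; B returns [] for non-positive limits.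
-- intended difference: On inputs with limit <= 0 and at least one line containing a keyword, A returns that first matching line anyway (it appends before checking the limit) while B returns [], the intended meaning of a non-positive limit. — e.g. on _collect_keyword_hits(["a"], ["a"], 0): A returns [(1, "a")], B returns []
import Mathlib
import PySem

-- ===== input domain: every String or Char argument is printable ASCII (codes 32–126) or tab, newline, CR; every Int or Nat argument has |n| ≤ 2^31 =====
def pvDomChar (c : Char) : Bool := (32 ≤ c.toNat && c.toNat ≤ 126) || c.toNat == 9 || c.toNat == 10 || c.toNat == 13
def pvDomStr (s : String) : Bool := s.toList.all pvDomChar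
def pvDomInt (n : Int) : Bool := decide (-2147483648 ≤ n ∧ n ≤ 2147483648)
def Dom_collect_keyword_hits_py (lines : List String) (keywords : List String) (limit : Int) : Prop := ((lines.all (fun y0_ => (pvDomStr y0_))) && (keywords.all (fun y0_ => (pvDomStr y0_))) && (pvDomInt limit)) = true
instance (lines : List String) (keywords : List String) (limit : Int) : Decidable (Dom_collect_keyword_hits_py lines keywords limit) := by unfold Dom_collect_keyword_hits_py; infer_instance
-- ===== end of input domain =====

-- B inverts the loop nesting: per keyword it collects the set of matching 1-based line indices,
-- then sorts the set and takes the first `limit`, rebuilding (index, line) pairs by indexing;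
-- objective: alternative; B returns [] for non-positive limits (see D_ below).

-- ===== PORT A =====
-- the for-loop of A: state = hits accumulator; append then break once len(hits) >= limit
def pvGoA (keywords : List String) (limit : Int) : List String → Int → List (Int × String) → List (Int × String)
  | [], _, hits => hits
  | ln :: rest, i, hits =>
    if keywords.any (fun k => PySem.Str.isIn k ln) then
      let hits' := hits ++ [(i, ln)]
      if limit ≤ (hits'.length : Int) then hits' else pvGoA keywords limit rest (i + 1) hits'
    else pvGoA keywords limit rest (i + 1) hits

def collect_keyword_hits_py (lines : List String) (keywords : List String) (limit : Int) : List (Int × String) :=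
  pvGoA keywords limit lines 1 []

-- ===== PORT B =====
def collect_keyword_hits_py_alt (lines : List String) (keywords : List String) (limit : Int) : List (Int × String) :=
  if limit ≤ 0 then []
  else
    -- for k in keywords: matched.update(i for i, ln in enumerate(lines, start=1) if k in ln)
    let matched : PySem.Set Int := keywords.foldl
      (fun s k => PySem.Set.update s
        (((PySem.List.enumerate lines 1).filter (fun p => PySem.Str.isIn k p.2)).map (fun p => p.1)))
      PySem.Set.empty
    -- [(i, lines[i - 1]) for i in sorted(matched)[:limit]]
    ((PySem.List.sorted matched (fun x => x) false).take limit.toNat).map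
      (fun i => (i, PySem.List.pyGetD lines (i - 1) ""))

-- ===== PRECONDITION & SPEC =====
-- On inputs with limit ≤ 0 and at least one line containing a keyword, A still returns that first
-- hit (it appends before checking the limit); B returns [], the intended meaning of a
-- non-positive limit.
def D_collect_keyword_hits_py (lines : List String) (keywords : List String) (limit : Int) : Prop :=
  limit ≤ 0 ∧ ∃ ln ∈ lines, ∃ k ∈ keywords, PySem.Str.isIn k ln = true
instance (lines : List String) (keywords : List String) (limit : Int) : Decidable (D_collect_keyword_hits_py lines keywords limit) := by unfold D_collect_keyword_hits_py; infer_instance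

def Spec_collect_keyword_hits_py (lines : List String) (keywords : List String) (limit : Int) (out : List (Int × String)) : Prop := ¬ D_collect_keyword_hits_py lines keywords limit → out = collect_keyword_hits_py_alt lines keywords limit
instance (lines : List String) (keywords : List String) (limit : Int) (out : List (Int × String)) : Decidable (Spec_collect_keyword_hits_py lines keywords limit out) := by unfold Spec_collect_keyword_hits_py; infer_instance

def pvDiffWitness_collect_keyword_hits_py : List String × List String × Int := (["a"], ["a"], 0)
def pvDiffWitnessOut_collect_keyword_hits_py : (List (Int × String)) × (List (Int × String)) := ([(1, "a")], [])

-- ===== CLAIM (what is proved, stated in full; the proofs are below) =====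
def Claim_unchanged_collect_keyword_hits_py : Prop := ∀ (lines : List String) (keywords : List String) (limit : Int), Dom_collect_keyword_hits_py lines keywords limit → Spec_collect_keyword_hits_py lines keywords limit (collect_keyword_hits_py lines keywords limit)
def Claim_changed_collect_keyword_hits_py : Prop := Dom_collect_keyword_hits_py (pvDiffWitness_collect_keyword_hits_py.1) (pvDiffWitness_collect_keyword_hits_py.2.1) (pvDiffWitness_collect_keyword_hits_py.2.2) ∧ D_collect_keyword_hits_py (pvDiffWitness_collect_keyword_hits_py.1) (pvDiffWitness_collect_keyword_hits_py.2.1) (pvDiffWitness_collect_keyword_hits_py.2.2) ∧ collect_keyword_hits_py (pvDiffWitness_collect_keyword_hits_py.1) (pvDiffWitness_collect_keyword_hits_py.2.1) (pvDiffWitness_collect_keyword_hits_py.2.2) = pvDiffWitnessOut_collect_keyword_hits_py.1 ∧ collect_keyword_hits_py_alt (pvDiffWitness_collect_keyword_hits_py.1) (pvDiffWitness_collect_keyword_hits_py.2.1) (pvDiffWitness_collect_keyword_hits_py.2.2) = pvDiffWitnessOut_collect_keyword_hits_py.2 ∧ pvDiffWitnessOut_collect_keyword_hits_py.1 ≠ 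pvDiffWitnessOut_collect_keyword_hits_py.2
def Claim_exact_collect_keyword_hits_py : Prop := ∀ (lines : List String) (keywords : List String) (limit : Int), Dom_collect_keyword_hits_py lines keywords limit → D_collect_keyword_hits_py lines keywords limit → collect_keyword_hits_py lines keywords limit ≠ collect_keyword_hits_py_alt lines keywords limit

-- ===== LEMMAS AND PROOFS =====

-- the loop with break vs. filter-then-take, under the invariant |hits| < limit
theorem pvGoA_eq_take (keywords : List String) (limit : Int) (rest : List String) :
    ∀ (i : Int) (acc : List (Int × String)), (acc.length : Int) < limit →
    pvGoA keywords limit rest i acc =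
      acc ++ ((PySem.List.enumerate rest i).filter
        (fun p => keywords.any (fun k => PySem.Str.isIn k p.2))).take (limit - acc.length).toNat := by
  induction rest with
  | nil => intro i acc _; simp [pvGoA, PySem.List.enumerate_nil]
  | cons ln rest ih =>
    intro i acc hlt
    rw [PySem.List.enumerate_cons]
    by_cases hc : keywords.any (fun k => PySem.Str.isIn k ln) = true
    · simp only [pvGoA, hc, if_true, List.filter_cons, List.length_append, List.length_cons,
        List.length_nil]
      by_cases hstop : limit ≤ ((acc.length + (0 + 1) : Nat) : Int)
      · rw [if_pos (by push_cast; push_cast at hstop; omega)]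
        have h1 : (limit - acc.length).toNat = 1 := by omega
        simp [h1]
      · rw [if_neg (by push_cast; push_cast at hstop; omega)]
        rw [ih (i + 1) (acc ++ [(i, ln)]) (by
          simp only [List.length_append, List.length_cons, List.length_nil]
          push_cast at hstop ⊢; omega)]
        have h2 : (limit - acc.length).toNat = ((limit - (acc ++ [(i, ln)]).length).toNat) + 1 := by
          simp only [List.length_append, List.length_cons, List.length_nil]
          push_cast at hstop ⊢; omega
        simp [h2, List.take_succ_cons]
    · simp only [pvGoA, hc, List.filter_cons]
      rw [ih (i + 1) acc hlt]
      simp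

-- when no line matches, the loop returns its accumulator unchanged
theorem pvGoA_no_match (keywords : List String) (limit : Int) (rest : List String)
    (hno : ∀ ln ∈ rest, keywords.any (fun k => PySem.Str.isIn k ln) = false) :
    ∀ (i : Int) (acc : List (Int × String)), pvGoA keywords limit rest i acc = acc := by
  induction rest with
  | nil => intro i acc; simp [pvGoA]
  | cons ln rest ih =>
    intro i acc
    simp only [pvGoA, hno ln (by simp)]
    exact ih (fun l hl => hno l (by simp [hl])) (i + 1) acc

-- with limit ≤ 0 and a matching line, the loop returns a non-empty list
theorem pvGoA_ne_nil (keywords : List String) (limit : Int) (hlim : limit ≤ 0) (rest : List String)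
    (hex : ∃ ln ∈ rest, keywords.any (fun k => PySem.Str.isIn k ln) = true) :
    ∀ (i : Int) (acc : List (Int × String)), pvGoA keywords limit rest i acc ≠ [] := by
  induction rest with
  | nil => rcases hex with ⟨ln, h, _⟩; exact absurd h (by simp)
  | cons ln rest ih =>
    intro i acc
    by_cases hc : keywords.any (fun k => PySem.Str.isIn k ln) = true
    · simp only [pvGoA, hc, if_true]
      rw [if_pos (by omega)]
      simp
    · simp only [pvGoA, hc]
      rcases hex with ⟨l, hl, hml⟩
      rcases List.mem_cons.1 hl with h | h
      · exact absurd (h ▸ hml) hc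
      · exact ih ⟨l, h, hml⟩ (i + 1) acc

-- membership in the fold of set-updates
theorem pv_mem_foldl_update {α β : Type} [BEq α] [LawfulBEq α] (g : β → List α) (l : List β)
    (i : α) : ∀ s : PySem.Set α,
    (i ∈ l.foldl (fun s k => PySem.Set.update s (g k)) s ↔ i ∈ s ∨ ∃ k ∈ l, i ∈ g k) := by
  induction l with
  | nil => intro s; simp
  | cons k l ih =>
    intro s
    rw [List.foldl_cons, ih]
    simp only [PySem.Set.mem_update, List.mem_cons]
    constructor
    · rintro (⟨h | h⟩ | ⟨k', hk', h⟩)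
      · exact Or.inl h
      · exact Or.inr ⟨k, Or.inl rfl, h⟩
      · exact Or.inr ⟨k', Or.inr hk', h⟩
    · rintro (h | ⟨k', hk' | hk', h⟩)
      · exact Or.inl (Or.inl h)
      · exact Or.inl (Or.inr (hk' ▸ h))
      · exact Or.inr ⟨k', hk', h⟩

-- the fold of set-updates keeps the no-duplicates invariant
theorem pv_nodup_foldl_update {α β : Type} [BEq α] [LawfulBEq α] (g : β → List α) (l : List β) :
    ∀ s : PySem.Set α, s.Nodup → (l.foldl (fun s k => PySem.Set.update s (g k)) s).Nodup := by
  induction l with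
  | nil => intro s hs; simpa using hs
  | cons k l ih =>
    intro s hs
    rw [List.foldl_cons]
    exact ih (PySem.Set.update s (g k)) (PySem.Set.nodup_update s (g k) hs)

-- sorting B's matched index set recovers the index column of A's filtered enumeration
theorem pv_sorted_matched (lines keywords : List String) :
    PySem.List.sorted
      (keywords.foldl
        (fun s k => PySem.Set.update s
          (((PySem.List.enumerate lines 1).filter (fun p => PySem.Str.isIn k p.2)).map (fun p => p.1)))
        PySem.Set.empty) (fun x => x) false =
      ((PySem.List.enumerate lines 1).filter
        (fun p => keywords.any (fun k => PySem.Str.isIn k p.2))).map (fun p => p.1) := by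
  have hpw : ((PySem.List.enumerate lines 1).filter
      (fun p => keywords.any (fun k => PySem.Str.isIn k p.2))).Pairwise
      (fun p q : Int × String => p.1 < q.1) :=
    (PySem.List.pairwise_lt_enumerate lines 1).filter _
  apply PySem.List.sorted_eq_of_perm_of_pairwise_lt
  · rw [List.perm_ext_iff_of_nodup]
    · intro i
      rw [pv_mem_foldl_update]
      simp only [PySem.Set.empty, List.not_mem_nil, false_or, List.mem_map, List.mem_filter,
        List.any_eq_true]
      constructor
      · rintro ⟨p, ⟨hp, hpred⟩, hi⟩
        rcases hpred with ⟨k, hk, hin⟩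
        exact ⟨k, hk, p, ⟨hp, hin⟩, hi⟩
      · rintro ⟨k, hk, p, ⟨hp, hin⟩, hi⟩
        exact ⟨p, ⟨hp, k, hk, hin⟩, hi⟩
    · exact (List.pairwise_map.mpr hpw).imp (fun h => ne_of_lt h)
    · exact pv_nodup_foldl_update _ _ _ List.nodup_nil
  · exact List.pairwise_map.mpr hpw

-- every pair of the filtered enumeration is rebuilt unchanged by (i, lines[i-1])
theorem pv_rebuild (lines : List String) (p : Int × String)
    (hp : p ∈ PySem.List.enumerate lines 1) :
    (p.1, PySem.List.pyGetD lines (p.1 - 1) "") = p := by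
  rcases (PySem.List.mem_enumerate_iff lines 1 p).1 hp with ⟨k, hk, rfl⟩
  have h1 : (1 : Int) + k - 1 = (k : Int) := by omega
  simp [h1, List.getD, hk]

theorem pv_main (lines keywords : List String) (limit : Int)
    (hD : ¬ D_collect_keyword_hits_py lines keywords limit) :
    collect_keyword_hits_py lines keywords limit = collect_keyword_hits_py_alt lines keywords limit := by
  unfold collect_keyword_hits_py collect_keyword_hits_py_alt
  by_cases hlim : limit ≤ 0
  · rw [if_pos hlim]
    apply pvGoA_no_match
    intro ln hln
    by_contra hne
    exact hD ⟨hlim, ln, hln, by simpa [List.any_eq_true] using hne⟩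
  · rw [if_neg hlim]
    rw [pvGoA_eq_take keywords limit lines 1 [] (by simp; omega)]
    simp only [List.length_nil, Int.natCast_zero, sub_zero, List.nil_append]
    rw [pv_sorted_matched, ← List.map_take, List.map_map]
    symm
    have hmem : ∀ p ∈ (((PySem.List.enumerate lines 1).filter
        (fun p => keywords.any (fun k => PySem.Str.isIn k p.2))).take limit.toNat),
        ((fun i => (i, PySem.List.pyGetD lines (i - 1) "")) ∘ (fun p : Int × String => p.1)) p
          = id p := by
      intro p hp
      exact pv_rebuild lines p (List.mem_of_mem_filter (List.mem_of_mem_take hp))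
    rw [List.map_congr_left hmem, List.map_id]

-- ===== VERDICT (by name: the statement is the Claim_ definition above) =====
theorem collect_keyword_hits_py_spec : Claim_unchanged_collect_keyword_hits_py := by
  intro lines keywords limit _ hD
  exact pv_main lines keywords limit hD

theorem collect_keyword_hits_py_changed : Claim_changed_collect_keyword_hits_py := by
  unfold Claim_changed_collect_keyword_hits_py; decide

theorem collect_keyword_hits_py_tight : Claim_exact_collect_keyword_hits_py := by
  intro lines keywords limit _ hD
  rcases hD with ⟨hlim, ln, hln, k, hk, hin⟩
  unfold collect_keyword_hits_py collect_keyword_hits_py_alt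
  rw [if_pos hlim]
  exact pvGoA_ne_nil keywords limit hlim lines
    ⟨ln, hln, by simp [List.any_eq_true]; exact ⟨k, hk, hin⟩⟩ 1 []
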